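-- pv_equiv track=rewrite | github.com/jleftync/PY110Actual | spot_exercises/exercise_9.py | scramble_help
-- ===== SOURCE A (Python) =====
-- def scramble_help(inpt):
--     scr_list = list(inpt)
--
--     non_int_lst = [(idx, char) for idx, char in enumerate(scr_list) if not char.isalnum()]
--
--     # Keep only alphanumeric characters in scr_list
--     out_list = [char for char in scr_list if char.isalnum()]
--
--     first, middle, last = out_list[0], out_list[1: -1], out_list[-1]
--     middle.sort()
--     mixed = [first] + middle + [last]
--     for x, y in non_int_lst:
--         mixed.insert(x, y)
--
--
--     return("".join(mixed))
-- ===== SOURCE B (Python) =====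
-- def scramble_help(inpt):
--     alnum = [c for c in inpt if c.isalnum()]
--     seq = iter([alnum[0]] + sorted(alnum[1:-1]) + [alnum[-1]])
--     return "".join(next(seq) if c.isalnum() else c for c in inpt)
-- ===== Notes on version B (the rewrite author's own statement) =====
-- stated objective: alternative
-- what changed: B drops the loop of list.insert calls that re-inserts each punctuation character into the sorted list and instead rebuilds the result in one left-to-right pass over the original string, consuming the sorted alphanumeric sequence from an iterator.
-- intended difference: On strings with exactly one alphanumeric character A duplicates it (out_list[0] and out_list[-1] are the same element, e.g. '.a' -> '.aa'), while B returns the string unchanged ('.a'), which is the intended answer when there is nothing to scramble. — e.g. on scramble_help(".a"): A returns ".aa", B returns ".a"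
import Mathlib
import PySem

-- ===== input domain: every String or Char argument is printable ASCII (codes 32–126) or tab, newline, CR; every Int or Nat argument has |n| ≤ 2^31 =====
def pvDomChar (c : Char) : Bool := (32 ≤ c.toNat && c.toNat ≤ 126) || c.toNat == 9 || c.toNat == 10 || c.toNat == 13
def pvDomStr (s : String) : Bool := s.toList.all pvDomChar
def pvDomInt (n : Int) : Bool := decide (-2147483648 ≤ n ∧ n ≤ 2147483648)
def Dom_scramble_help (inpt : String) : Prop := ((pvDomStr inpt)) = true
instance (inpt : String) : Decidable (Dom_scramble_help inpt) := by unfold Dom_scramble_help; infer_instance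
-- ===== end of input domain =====

-- B replaces A's repeated list.insert reconstruction by a single left-to-right merge of the
-- sorted alphanumeric sequence with the original string (alternative decomposition).


-- ===== PORT A =====
-- literal port: enumerate+filter of non-alnum positions, alnum-only list, first/middle/last,
-- middle sorted, then each non-alnum char re-inserted with list.insert at its original index.
def scramble_help (inpt : String) : String :=
  let scr_list := inpt.toList
  let non_int_lst := (PySem.List.enumerate scr_list).filter (fun q => !(PySem.Chars.isalnum q.2))
  let out_list := scr_list.filter (fun c => PySem.Chars.isalnum c)
  match PySem.List.pyGet? out_list 0, PySem.List.pyGet? out_list (-1) with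
  | some first, some last =>
      let middle := PySem.List.sorted (PySem.List.slice out_list (some 1) (some (-1))) (fun c => c) false
      let mixed := [first] ++ middle ++ [last]
      String.ofList (non_int_lst.foldl (fun acc q => PySem.List.insert acc q.1 q.2) mixed)
  | _, _ => ""   -- out_list empty: Python raises IndexError (excluded by Pre_)

-- ===== PORT B =====
-- next(seq) if c.isalnum() else c, consuming the prepared sequence left to right
def mergeAlnum : List Char → List Char → List Char
  | [], _ => []
  | c :: cs, seq =>
      if PySem.Chars.isalnum c then
        match seq with
        | s :: rest => s :: mergeAlnum cs rest
        | [] => c :: mergeAlnum cs []    -- iterator exhausted: unreachable inside Pre_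
      else c :: mergeAlnum cs seq

def scramble_help_alt (inpt : String) : String :=
  let alnum := inpt.toList.filter (fun c => PySem.Chars.isalnum c)
  match PySem.List.pyGet? alnum 0 with
  | none => ""   -- alnum[0] raises IndexError (excluded by Pre_)
  | some f =>
      match PySem.List.pyGet? alnum (-1) with
      | none => ""
      | some l =>
          let seq := [f] ++ PySem.List.sorted (PySem.List.slice alnum (some 1) (some (-1))) (fun c => c) false ++ [l]
          String.ofList (mergeAlnum inpt.toList seq)

-- ===== PRECONDITION & SPEC =====
-- Pre_ excludes strings with no alphanumeric character: there Python A raises IndexError on out_list[0].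
def Pre_scramble_help (inpt : String) : Prop :=
  (inpt.toList.any (fun c => PySem.Chars.isalnum c)) = true
instance (inpt : String) : Decidable (Pre_scramble_help inpt) := by
  unfold Pre_scramble_help; infer_instance
def pvWitness_scramble_help : String := "ab"

-- On strings with exactly one alphanumeric character A returns that character twice
-- (out_list[0] and out_list[-1] are the same element, so it is duplicated), while B returns the
-- string with the single character once, which is the intended "nothing to scramble" answer.
-- the ASCII alphanumeric character class, spelled out as ranges
def alnumCharD (c : Char) : Bool :=
  ('A' ≤ c && c ≤ 'Z') || ('a' ≤ c && c ≤ 'z') || ('0' ≤ c && c ≤ '9')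

-- Bool test for "exactly one alphanumeric character", short-circuiting at the second one
def exactlyOneAlnum : List Char → Bool
  | [] => false
  | c :: cs => if alnumCharD c then !cs.any alnumCharD else exactlyOneAlnum cs

def D_scramble_help (inpt : String) : Prop :=
  exactlyOneAlnum inpt.toList = true
instance (inpt : String) : Decidable (D_scramble_help inpt) := by
  unfold D_scramble_help; infer_instance

def Spec_scramble_help (inpt : String) (out : String) : Prop :=
  ¬ D_scramble_help inpt → out = scramble_help_alt inpt
instance (inpt : String) (out : String) : Decidable (Spec_scramble_help inpt out) := by
  unfold Spec_scramble_help; infer_instance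

def pvDiffWitness_scramble_help : String := ".a"
def pvDiffWitnessOut_scramble_help : String × String := (".aa", ".a")

-- ===== CLAIM (what is proved, stated in full; the proofs are below) =====
def Claim_unchanged_scramble_help : Prop :=
  ∀ (inpt : String), Dom_scramble_help inpt → Pre_scramble_help inpt →
    Spec_scramble_help inpt (scramble_help inpt)
def Claim_changed_scramble_help : Prop :=
  Dom_scramble_help (pvDiffWitness_scramble_help) ∧
  Pre_scramble_help (pvDiffWitness_scramble_help) ∧
  D_scramble_help (pvDiffWitness_scramble_help) ∧
  scramble_help (pvDiffWitness_scramble_help) = pvDiffWitnessOut_scramble_help.1 ∧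
  scramble_help_alt (pvDiffWitness_scramble_help) = pvDiffWitnessOut_scramble_help.2 ∧
  pvDiffWitnessOut_scramble_help.1 ≠ pvDiffWitnessOut_scramble_help.2
def Claim_exact_scramble_help : Prop :=
  ∀ (inpt : String), Dom_scramble_help inpt → Pre_scramble_help inpt →
    D_scramble_help inpt → scramble_help inpt ≠ scramble_help_alt inpt

-- ===== LEMMAS AND PROOFS =====

-- the insert loop over the (index, char) pairs of the non-alnum positions rebuilds exactly
-- the left-to-right merge, for ANY replacement list ys of the right length
theorem foldl_insert_eq_merge (cs : List Char) :
    ∀ (ys pre : List Char),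
      ys.length = (cs.filter (fun c => PySem.Chars.isalnum c)).length →
      ((PySem.List.enumerate cs (pre.length : Int)).filter
          (fun q => !(PySem.Chars.isalnum q.2))).foldl
        (fun acc q => PySem.List.insert acc q.1 q.2) (pre ++ ys)
      = pre ++ mergeAlnum cs ys := by
  induction cs with
  | nil =>
      intro ys pre h
      simp only [List.filter_nil, List.length_nil] at h
      have hys : ys = [] := List.length_eq_zero_iff.mp (by simpa using h)
      subst hys
      simp [PySem.List.enumerate, mergeAlnum]
  | cons c cs ih =>
      intro ys pre h
      rw [PySem.List.enumerate_cons]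
      by_cases hc : PySem.Chars.isalnum c = true
      · -- alnum head: pair filtered out, consume one ys element
        cases ys with
        | nil => simp [hc] at h
        | cons y ys' =>
            have hlen : ys'.length = (cs.filter (fun c => PySem.Chars.isalnum c)).length := by
              simp [hc] at h; omega
            have := ih ys' (pre ++ [y]) hlen
            simp only [List.length_append, List.length_cons, List.length_nil] at this
            push_cast at this
            simp only [List.filter_cons, hc, Bool.not_true, mergeAlnum]
            simp only [List.append_assoc, List.singleton_append] at this
            simpa using this
      · -- non-alnum head: pair kept, insert at index pre.length
        have hb : (!(PySem.Chars.isalnum (c := c))) = true := by simp [hc]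
        simp only [List.filter_cons, hb, if_true, List.foldl_cons]
        have hins : PySem.List.insert (pre ++ ys) (pre.length : Int) c
            = (pre ++ [c]) ++ ys := by
          rw [PySem.List.insert_natCast (pre ++ ys) pre.length c (by simp)]
          simp
        rw [hins]
        have hlen : ys.length = (cs.filter (fun c => PySem.Chars.isalnum c)).length := by
          simpa [List.filter_cons, hc] using h
        have := ih ys (pre ++ [c]) hlen
        simp only [List.length_append, List.length_cons, List.length_nil] at this
        push_cast at this
        simp only [mergeAlnum, hc]
        simp only [List.append_assoc, List.singleton_append] at this ⊢
        simpa using this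

theorem alnumCharD_eq : alnumCharD = (fun c => PySem.Chars.isalnum c) := rfl

theorem exactlyOneAlnum_iff (cs : List Char) :
    exactlyOneAlnum cs = true ↔ (cs.filter (fun c => PySem.Chars.isalnum c)).length = 1 := by
  induction cs with
  | nil => simp [exactlyOneAlnum]
  | cons c cs ih =>
      by_cases hc : PySem.Chars.isalnum c = true
      · simp only [exactlyOneAlnum, alnumCharD_eq, hc, if_true, List.filter_cons,
          List.length_cons]
        constructor
        · intro h
          have hnil : cs.filter (fun c => PySem.Chars.isalnum c) = [] :=
            List.filter_eq_nil_iff.mpr (by simpa [List.any_eq_false] using h)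
          simp [hnil]
        · intro h
          have hnil : cs.filter (fun c => PySem.Chars.isalnum c) = [] := by
            rw [← List.length_eq_zero_iff]
            omega
          have := List.filter_eq_nil_iff.mp hnil
          simpa [List.any_eq_false] using this
      · simp only [exactlyOneAlnum, alnumCharD_eq, hc, if_false, List.filter_cons,
          Bool.false_eq_true]
        simpa [hc] using ih

theorem countP_not_eq (cs : List Char) (p : Char → Bool) :
    cs.countP (fun c => !(p c)) = cs.length - (cs.filter p).length := by
  have hsplit := List.length_eq_countP_add_countP p (l := cs)
  simp only [decide_not, Bool.decide_eq_true] at hsplit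
  have h2 : cs.countP p = (cs.filter p).length := List.countP_eq_length_filter
  omega

theorem mergeAlnum_length (cs : List Char) : ∀ ys, (mergeAlnum cs ys).length = cs.length := by
  induction cs with
  | nil => intro ys; simp [mergeAlnum]
  | cons c cs ih =>
      intro ys
      by_cases hc : PySem.Chars.isalnum c = true
      · cases ys with
        | nil => simp [mergeAlnum, hc, ih]
        | cons y ys' => simp [mergeAlnum, hc, ih]
      · simp [mergeAlnum, hc, ih]

theorem foldl_insert_length (l : List (Int × Char)) :
    ∀ (xs : List Char),
      (l.foldl (fun acc q => PySem.List.insert acc q.1 q.2) xs).length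
        = xs.length + l.length := by
  induction l with
  | nil => intro xs; simp
  | cons q l ih =>
      intro xs
      rw [List.foldl_cons, ih]
      simp [PySem.List.length_insert]
      omega

-- both ports read first/last/middle from the same filtered list
theorem scramble_help_spec : Claim_unchanged_scramble_help := by
  intro inpt _ hpre hnd
  simp only [scramble_help, scramble_help_alt]
  set cs := inpt.toList with hcs
  set al := cs.filter (fun c => PySem.Chars.isalnum c) with hal
  have hpos : 0 < al.length := by
    unfold Pre_scramble_help at hpre
    rcases List.any_eq_true.mp hpre with ⟨c, hc, hcal⟩
    have : c ∈ al := List.mem_filter.mpr ⟨hc, hcal⟩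
    exact List.length_pos_of_mem this
  have hne1 : al.length ≠ 1 := by
    unfold D_scramble_help at hnd
    rw [Ne, ← exactlyOneAlnum_iff]
    simpa [hal] using hnd
  have h2 : 2 ≤ al.length := by omega
  -- both pyGet? succeed
  have hnil : al ≠ [] := by intro h; simp [h] at hpos
  obtain ⟨a, t, hat⟩ := List.exists_cons_of_ne_nil hnil
  obtain ⟨f, hf⟩ : ∃ f, PySem.List.pyGet? al 0 = some f :=
    ⟨a, by rw [hat]; exact PySem.List.pyGet?_zero_cons a t⟩
  obtain ⟨l, hl⟩ : ∃ l, PySem.List.pyGet? al (-1) = some l := by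
    refine ⟨al.getLast hnil, ?_⟩
    rw [PySem.List.pyGet?_neg_one]
    exact List.getLast?_eq_some_getLast hnil
  rw [hf, hl]
  -- the common sorted sequence and its length
  set seq := [f] ++ PySem.List.sorted (PySem.List.slice al (some 1) (some (-1))) (fun c => c) false ++ [l] with hseq
  have hslice : (PySem.List.slice al (some 1) (some (-1))).length = al.length - 2 := by
    rw [PySem.List.length_slice]
    rw [PySem.List.clampIdx_neg_one]
    have h1 : PySem.List.clampIdx al.length (1 : Int) = 1 := by
      simpa [PySem.List.clampIdx_natCast] using by omega
    rw [h1]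
    omega
  have hseqlen : seq.length = al.length := by
    simp [hseq, PySem.List.length_sorted, hslice]
    omega
  have hm := foldl_insert_eq_merge cs seq ([]) (by simpa [hseqlen, hal])
  simp only [List.nil_append, List.length_nil, Nat.cast_zero] at hm
  rw [hseq] at hm
  exact congrArg String.ofList hm

theorem scramble_help_changed : Claim_changed_scramble_help := by
  unfold Claim_changed_scramble_help; decide

theorem scramble_help_tight : Claim_exact_scramble_help := by
  intro inpt _ hpre hd
  simp only [scramble_help, scramble_help_alt]
  set cs := inpt.toList with hcs
  set al := cs.filter (fun c => PySem.Chars.isalnum c) with hal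
  have h1 : al.length = 1 := by
    unfold D_scramble_help at hd
    rw [hal, ← exactlyOneAlnum_iff]
    exact hd
  obtain ⟨a, ha⟩ : ∃ a, al = [a] := List.length_eq_one_iff.mp h1
  -- both matches take the 'some' branch
  have hf : PySem.List.pyGet? al 0 = some a := by
    rw [ha]; exact PySem.List.pyGet?_zero_cons a []
  have hl : PySem.List.pyGet? al (-1) = some a := by
    rw [ha, PySem.List.pyGet?_neg_one]; rfl
  rw [hf, hl]
  intro h
  -- compare lengths: A's output has cs.length + 1 chars, B's has cs.length
  have hlists := String.ofList_injective h
  have hlen := congrArg List.length hlists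
  rw [foldl_insert_length, mergeAlnum_length] at hlen
  -- the non-alnum pairs number cs.length - 1, the seed list has 2 elements
  have hcnt : ((PySem.List.enumerate cs (0:Int)).filter
      (fun q => !(PySem.Chars.isalnum q.2))).length = cs.length - al.length := by
    rw [← List.countP_eq_length_filter]
    have hen : ((PySem.List.enumerate cs (0:Int)).countP (fun q => !(PySem.Chars.isalnum q.2)))
        = cs.countP (fun c => !(PySem.Chars.isalnum c)) := by
      have hmap := PySem.List.map_snd_enumerate cs (0:Int)
      calc ((PySem.List.enumerate cs (0:Int)).countP (fun q => !(PySem.Chars.isalnum q.2)))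
          = (((PySem.List.enumerate cs (0:Int)).map (·.2)).countP
              (fun c => !(PySem.Chars.isalnum c))) := by
            rw [List.countP_map]; rfl
        _ = cs.countP (fun c => !(PySem.Chars.isalnum c)) := by rw [hmap]
    rw [hen, hal]
    exact countP_not_eq cs _
  have hlenpos : 1 ≤ cs.length := by
    have : al.length ≤ cs.length := by
      rw [hal]; exact List.length_filter_le _ _
    omega
  rw [hcnt] at hlen
  simp [ha, PySem.List.slice, PySem.List.sorted] at hlen
  omega
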